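-- pv_equiv track=rewrite | github.com/fdzidic/advent-of-code-2018 | advent_problem/days/AdventDay02.py | _ocurring_twice_or_thrice
-- ===== SOURCE A (Python) =====
-- def _ocurring_twice_or_thrice(line):
--     character_count = {}
--     twice_ocurring, thrice_occuring = (0,0)
--     for character in line:
--         character_count[character] = character_count.get(character, 0) + 1
--
--     for value in character_count.values():
--         if value == 2:
--             twice_ocurring = 1
--         elif value == 3:
--             thrice_occuring = 1
--
--     return (twice_ocurring, thrice_occuring)
-- ===== SOURCE B (Python) =====
-- def _ocurring_twice_or_thrice(line):
--     s = sorted(line)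
--     twice = thrice = 0
--     i, n = 0, len(s)
--     while i < n:
--         j = i
--         while j < n and s[j] == s[i]:
--             j += 1
--         run = j - i
--         if run == 2:
--             twice = 1
--         elif run == 3:
--             thrice = 1
--         i = j
--     return (twice, thrice)
-- ===== Notes on version B (the rewrite author's own statement) =====
-- stated objective: alternative
-- what changed: Replaces the dict-based character counting plus a pass over the dict values with sort-then-scan: sort the characters and derive each count as the length of a consecutive equal run, setting the two flags during that single scan.
import Mathlib
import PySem

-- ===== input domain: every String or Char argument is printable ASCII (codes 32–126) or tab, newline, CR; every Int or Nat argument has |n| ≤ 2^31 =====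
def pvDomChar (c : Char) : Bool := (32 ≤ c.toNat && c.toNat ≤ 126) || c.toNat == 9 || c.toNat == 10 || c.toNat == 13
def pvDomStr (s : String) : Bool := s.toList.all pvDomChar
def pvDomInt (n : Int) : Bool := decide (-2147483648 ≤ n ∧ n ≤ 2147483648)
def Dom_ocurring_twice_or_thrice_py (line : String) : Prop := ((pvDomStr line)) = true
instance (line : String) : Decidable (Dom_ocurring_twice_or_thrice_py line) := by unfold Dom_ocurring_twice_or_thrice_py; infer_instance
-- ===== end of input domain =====

-- B sorts the characters and scans consecutive equal runs instead of building a count dict: alternative algorithm, same results.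

-- ===== PORT A =====
def ocurring_twice_or_thrice_py (line : String) : Int × Int :=
  let character_count : PySem.Dict Char Int :=
    line.toList.foldl (fun d character => d.insert character (d.getD character 0 + 1)) PySem.Dict.empty
  character_count.values.foldl
    (fun p v => if v = 2 then (1, p.2) else if v = 3 then (p.1, 1) else p) (0, 0)

-- ===== PORT B =====
-- outer while loop of Source B: the inner 'advance j while s[j] == s[i]' is the takeWhile,
-- run = j - i is 1 + length of that run tail, and 'i = j' resumes at the dropWhile.
def pvRunLoop : List Char → Int × Int → Int × Int
  | [], acc => acc
  | c :: rest, acc =>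
    let grp := rest.takeWhile (· == c)
    let run : Int := 1 + grp.length
    let acc' := if run = 2 then (1, acc.2) else if run = 3 then (acc.1, 1) else acc
    pvRunLoop (rest.dropWhile (· == c)) acc'
termination_by s _ => s.length
decreasing_by
  exact Nat.lt_succ_of_le (List.Sublist.length_le (List.dropWhile_sublist _))

def ocurring_twice_or_thrice_py_alt (line : String) : Int × Int :=
  pvRunLoop (PySem.List.sorted line.toList (fun c => c) false) (0, 0)

-- ===== PRECONDITION & SPEC =====
def Spec_ocurring_twice_or_thrice_py (line : String) (out : Int × Int) : Prop := out = ocurring_twice_or_thrice_py_alt line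
instance (line : String) (out : Int × Int) : Decidable (Spec_ocurring_twice_or_thrice_py line out) := by unfold Spec_ocurring_twice_or_thrice_py; infer_instance

-- ===== CLAIM (what is proved, stated in full; the proofs are below) =====
def Claim_equal_ocurring_twice_or_thrice_py : Prop := ∀ (line : String), Dom_ocurring_twice_or_thrice_py line → Spec_ocurring_twice_or_thrice_py line (ocurring_twice_or_thrice_py line)

-- ===== LEMMAS AND PROOFS =====

-- A's value-scanning loop sets each flag iff the corresponding value occurs.
theorem pv_flag_fold (vs : List Int) (acc : Int × Int) :
    vs.foldl (fun p v => if v = 2 then (1, p.2) else if v = 3 then (p.1, 1) else p) acc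
      = (if 2 ∈ vs then 1 else acc.1, if 3 ∈ vs then 1 else acc.2) := by
  induction vs generalizing acc with
  | nil => simp
  | cons v t ih =>
    simp only [List.foldl_cons, ih, List.mem_cons]
    rcases eq_or_ne v 2 with rfl | h2
    · simp
    · rcases eq_or_ne v 3 with rfl | h3
      · simp
      · simp [h2, h3, Ne.symm h2, Ne.symm h3]

theorem pv_takeWhile_all {c : Char} {l : List Char} (x : Char)
    (hx : x ∈ l.takeWhile (· == c)) : x = c := by
  have := List.mem_takeWhile_imp hx
  simpa using this

theorem pv_dropWhile_notmem {c : Char} {l : List Char}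
    (hp : (c :: l).Pairwise (· ≤ ·)) : c ∉ l.dropWhile (· == c) := by
  intro hmem
  have hsub : (l.dropWhile (· == c)).Sublist l := List.dropWhile_sublist _
  cases hd : l.dropWhile (· == c) with
  | nil => simp [hd] at hmem
  | cons h t =>
    have hh : ¬ (h == c) = true := by
      have := List.head?_dropWhile_not (p := (· == c)) (l := l)
      rw [hd] at this; simpa using this
    have hhc : h ≠ c := by simpa using hh
    rw [hd] at hmem hsub
    -- every element of l is ≥ c, and the dropWhile suffix is pairwise ≤ with head h > c
    have hcl : ∀ x ∈ l, c ≤ x := (List.pairwise_cons.mp hp).1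
    have hch : c ≤ h := hcl h (hsub.mem (by simp))
    have hlt : c < h := lt_of_le_of_ne hch (Ne.symm hhc)
    have hpl : l.Pairwise (· ≤ ·) := (List.pairwise_cons.mp hp).2
    have hpd : (h :: t).Pairwise (· ≤ ·) := hpl.sublist hsub
    rcases List.mem_cons.mp hmem with rfl | hmt
    · exact hhc rfl
    · have : h ≤ c := (List.pairwise_cons.mp hpd).1 c hmt
      exact absurd this (not_le_of_gt hlt)

-- B's run loop on a sorted list sets each flag iff some character's count is 2 / 3.
theorem pv_runLoop_spec (s : List Char) (hp : s.Pairwise (· ≤ ·)) (acc : Int × Int) :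
    pvRunLoop s acc
      = (if ∃ c ∈ s, s.count c = 2 then 1 else acc.1,
         if ∃ c ∈ s, s.count c = 3 then 1 else acc.2) := by
  induction hn : s.length using Nat.strong_induction_on generalizing s acc with
  | _ n ih =>
  cases s with
  | nil => simp [pvRunLoop]
  | cons c rest =>
    subst hn
    set t := rest.takeWhile (· == c) with ht
    set d := rest.dropWhile (· == c) with hdd
    have hsplit : t ++ d = rest := List.takeWhile_append_dropWhile
    have hcd : c ∉ d := pv_dropWhile_notmem hp
    have htc : ∀ x ∈ t, x = c := fun x hx => pv_takeWhile_all x hx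
    -- counts in c :: rest
    have hrest_count_c : rest.count c = t.length := by
      rw [← hsplit, List.count_append]
      have h1 : t.count c = t.length := List.count_eq_length.mpr (fun x hx => by
        have := htc x hx; simp [this])
      have h2 : d.count c = 0 := List.count_eq_zero.mpr hcd
      omega
    have hcount_c : (c :: rest).count c = 1 + t.length := by
      simp [hrest_count_c]; omega
    have hcount_ne : ∀ x, x ≠ c → (c :: rest).count x = d.count x := by
      intro x hx
      rw [List.count_cons, ← hsplit, List.count_append]
      have h1 : t.count x = 0 := List.count_eq_zero.mpr (fun hm => hx (htc x hm))
      simp [h1, Ne.symm hx]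
    have hpd : d.Pairwise (· ≤ ·) :=
      ((List.pairwise_cons.mp hp).2).sublist (List.dropWhile_sublist _)
    have hdlen : d.length < (c :: rest).length :=
      Nat.lt_succ_of_le (List.Sublist.length_le (List.dropWhile_sublist _))
    -- membership/count in d agrees with the whole list for x ≠ c
    have hmemd : ∀ x ∈ d, x ≠ c := by
      intro x hx hxc; exact hcd (hxc ▸ hx)
    have hdcount : ∀ x ∈ d, d.count x = (c :: rest).count x := by
      intro x hx; exact (hcount_ne x (hmemd x hx)).symm
    have hex : ∀ (k : ℕ), (∃ x ∈ (c :: rest), (c :: rest).count x = k)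
        ↔ ((1 + t.length = k) ∨ ∃ x ∈ d, d.count x = k) := by
      intro k
      constructor
      · rintro ⟨x, hxm, hxc⟩
        by_cases hxeq : x = c
        · left; rw [hxeq, hcount_c] at hxc; omega
        · right
          refine ⟨x, ?_, by rw [hcount_ne x hxeq] at hxc; exact hxc⟩
          rcases List.mem_cons.mp hxm with rfl | hxr
          · exact absurd rfl hxeq
          · rw [← hsplit] at hxr
            rcases List.mem_append.mp hxr with hxt | hxd
            · exact absurd (htc x hxt) hxeq
            · exact hxd
      · rintro (hk | ⟨x, hxm, hxc⟩)
        · exact ⟨c, by simp, by rw [hcount_c]; omega⟩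
        · refine ⟨x, ?_, by rw [hcount_ne x (hmemd x hxm)]; exact hxc⟩
          have : x ∈ rest := (List.dropWhile_sublist _).mem hxm
          exact List.mem_cons_of_mem _ this
    rw [pvRunLoop, ← ht, ← hdd]
    rw [ih d.length hdlen d hpd _ rfl]
    clear ih
    have e2 : ((1 : Int) + (t.length : Int) = 2) ↔ (1 + t.length = 2) := by omega
    have e3 : ((1 : Int) + (t.length : Int) = 3) ↔ (1 + t.length = 3) := by omega
    rw [Prod.mk.injEq]
    constructor
    · simp only [hex]
      by_cases hA : 1 + t.length = 2 <;> by_cases hB : ∃ x ∈ d, d.count x = 2 <;>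
        by_cases hC : 1 + t.length = 3 <;> simp [e2, e3, hA, hB, hC]
    · simp only [hex]
      by_cases hA : 1 + t.length = 2 <;> by_cases hB : ∃ x ∈ d, d.count x = 3 <;>
        by_cases hC : 1 + t.length = 3 <;> simp [e2, e3, hA, hB, hC]

-- ===== VERDICT (by name: the statement is the Claim_ definition above) =====
theorem ocurring_twice_or_thrice_py_spec : Claim_equal_ocurring_twice_or_thrice_py := by
  intro line _
  unfold Spec_ocurring_twice_or_thrice_py ocurring_twice_or_thrice_py ocurring_twice_or_thrice_py_alt
  set xs := line.toList with hxs
  set s := PySem.List.sorted xs (fun c => c) false with hs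
  have hperm : s.Perm xs := PySem.List.sorted_perm xs (fun c => c) false
  have hpw : s.Pairwise (· ≤ ·) := by
    have := PySem.List.sorted_pairwise (xs := xs) (key := fun c => c)
    simpa using this
  rw [PySem.Dict.foldl_insert_getD_add_one_eq_counter]
  rw [pv_flag_fold, pv_runLoop_spec s hpw (0, 0)]
  -- A's dict values are the counts of the distinct characters
  have hvals : (PySem.Dict.counter xs).values = (PySem.Set.ofList xs).map (fun k => (xs.count k : Int)) := by
    have := PySem.Dict.items_counter (xs := xs)
    simp [PySem.Dict.values, this, List.map_map, Function.comp]
  rw [hvals]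
  have hmem : ∀ (k : Int), k ∈ (PySem.Set.ofList xs).map (fun c => (xs.count c : Int))
      ↔ ∃ c ∈ xs, (xs.count c : Int) = k := by
    intro k
    simp only [List.mem_map, PySem.Set.mem_ofList]
  have key : ∀ k : ℕ, ((k : ℤ) ∈ (PySem.Set.ofList xs).map (fun c => (xs.count c : Int))
      ↔ ∃ c ∈ s, s.count c = k) := by
    intro k
    rw [hmem]
    constructor <;> rintro ⟨c, hc, hk⟩
    · exact ⟨c, hperm.mem_iff.mpr hc, by rw [hperm.count_eq]; exact_mod_cast hk⟩
    · exact ⟨c, hperm.mem_iff.mp hc, by rw [hperm.count_eq] at hk; exact_mod_cast hk⟩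
  have g2 : ((2 : ℤ) ∈ (PySem.Set.ofList xs).map (fun c => (xs.count c : Int))
      ↔ ∃ c ∈ s, s.count c = 2) := by exact_mod_cast key 2
  have g3 : ((3 : ℤ) ∈ (PySem.Set.ofList xs).map (fun c => (xs.count c : Int))
      ↔ ∃ c ∈ s, s.count c = 3) := by exact_mod_cast key 3
  rw [Prod.mk.injEq]
  exact ⟨by simp only [g2], by simp only [g3]⟩
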